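-- pv_equiv track=rewrite | github.com/amit23071982/Demo | solution.py | solution
-- ===== SOURCE A (Python) =====
-- def solution(s):
--
--     left = 0
--     right = len(s) - 1
--     matches = 0
--
--     while left < right:
--         if s[left] != s[right]:
--             break
--         matches += 1
--         left += 1
--         right -= 1
--     return matches
-- ===== SOURCE B (Python) =====
-- def solution(s):
--     if len(s) < 2:
--         return 0
--     if s[0] == s[-1]:
--         return 1 + solution(s[1:-1])
--     return 0
-- ===== Notes on version B (the rewrite author's own statement) =====
-- stated objective: alternative
-- what changed: Replaced the two-pointer while loop with structural recursion that peels both ends and recurses on the inner slice s[1:-1].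
import Mathlib
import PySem

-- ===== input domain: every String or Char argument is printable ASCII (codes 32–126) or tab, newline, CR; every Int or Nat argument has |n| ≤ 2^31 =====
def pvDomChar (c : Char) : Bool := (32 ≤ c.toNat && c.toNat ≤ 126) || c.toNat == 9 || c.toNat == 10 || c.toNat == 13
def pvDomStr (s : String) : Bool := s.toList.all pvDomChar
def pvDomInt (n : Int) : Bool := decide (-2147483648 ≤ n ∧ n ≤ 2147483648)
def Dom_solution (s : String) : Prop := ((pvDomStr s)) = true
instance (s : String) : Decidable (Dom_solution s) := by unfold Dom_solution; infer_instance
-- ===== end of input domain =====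

-- B replaces A's two-pointer while loop by structural recursion that peels both ends
-- and recurses on the inner slice s[1:-1] (objective: alternative decomposition, same values).

-- ===== PORT A =====
-- the while loop: state (left, right, cnt)
def solutionLoop (cs : List Char) (left right cnt : Int) : Int :=
  if left < right then
    if PySem.List.pyGet? cs left ≠ PySem.List.pyGet? cs right then cnt
    else solutionLoop cs (left + 1) (right - 1) (cnt + 1)
  else cnt
termination_by (right - left).toNat
decreasing_by omega

def solution (s : String) : Int :=
  solutionLoop s.toList 0 ((s.toList.length : Int) - 1) 0

-- ===== PORT B =====
-- s[1:-1] is PySem.List.slice cs (some 1) (some (-1)); this lemma is cited for termination only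
lemma slice_one_neg_one {α : Type} (xs : List α) :
    PySem.List.slice xs (some 1) (some (-1)) = xs.tail.dropLast := by
  cases xs with
  | nil => simp [PySem.List.slice, PySem.List.clampIdx]
  | cons x t =>
    simp [PySem.List.slice, PySem.List.clampIdx, List.dropLast_eq_take]
    rw [if_neg (by omega)]
    omega

def solutionAltRec (cs : List Char) : Int :=
  if cs.length < 2 then 0
  else if PySem.List.pyGet? cs 0 = PySem.List.pyGet? cs (-1) then
    1 + solutionAltRec (PySem.List.slice cs (some 1) (some (-1)))
  else 0
termination_by cs.length
decreasing_by simp [slice_one_neg_one]; omega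

def solution_alt (s : String) : Int := solutionAltRec s.toList

-- ===== PRECONDITION & SPEC =====
def Spec_solution (s : String) (out : Int) : Prop := out = solution_alt s
instance (s : String) (out : Int) : Decidable (Spec_solution s out) := by unfold Spec_solution; infer_instance

-- ===== CLAIM (what is proved, stated in full; the proofs are below) =====
def Claim_equal_solution : Prop := ∀ (s : String), Dom_solution s → Spec_solution s (solution s)

-- ===== LEMMAS AND PROOFS =====

lemma take_tail {α : Type} (l : List α) (n : Nat) : (l.take n).tail = l.tail.take (n - 1) := by
  cases l <;> cases n <;> simp

lemma loop_eq (cs : List Char) : ∀ (d l r : Nat) (m : Int), r + 1 - l ≤ d → r < cs.length →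
    solutionLoop cs (l : Int) (r : Int) m = m + solutionAltRec ((cs.drop l).take (r + 1 - l)) := by
  intro d
  induction d with
  | zero =>
    intro l r m hd hr
    -- r + 1 - l = 0, i.e. r < l : loop exits, mid is empty
    rw [solutionLoop, solutionAltRec]
    have h0 : r + 1 - l = 0 := by omega
    rw [if_neg (by omega), h0]
    simp
  | succ d ih =>
    intro l r m hd hr
    by_cases hlr : l < r
    · -- mid has length r + 1 - l ≥ 2
      have hmidlen : ((cs.drop l).take (r + 1 - l)).length = r + 1 - l := by
        simp; omega
      have hmid : PySem.List.slice ((cs.drop l).take (r + 1 - l)) (some 1) (some (-1))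
          = (cs.drop (l + 1)).take ((r - 1) + 1 - (l + 1)) := by
        rw [slice_one_neg_one, take_tail, List.tail_drop, List.dropLast_eq_take,
            List.take_take]
        congr 1
        simp
        omega
      have hg0 : PySem.List.pyGet? ((cs.drop l).take (r + 1 - l)) 0 = some cs[l] := by
        rw [PySem.List.pyGet?_zero]
        rw [List.getElem?_take, if_pos (by omega), List.getElem?_drop]
        simp
      have hg1 : PySem.List.pyGet? ((cs.drop l).take (r + 1 - l)) (-1) = some cs[r] := by
        rw [PySem.List.pyGet?_neg_one, List.getLast?_eq_getElem?, hmidlen]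
        rw [List.getElem?_take, if_pos (by omega), List.getElem?_drop]
        simp [List.getElem?_eq_getElem (by omega : l + (r + 1 - l - 1) < cs.length)]
        congr 1
        omega
      have hgl : PySem.List.pyGet? cs (l : Int) = some cs[l] := by
        simp [List.getElem?_eq_getElem (by omega : l < cs.length)]
      have hgr : PySem.List.pyGet? cs (r : Int) = some cs[r] := by
        simp [List.getElem?_eq_getElem hr]
      have hB : solutionAltRec ((cs.drop l).take (r + 1 - l)) =
          if cs[l] = cs[r] then 1 + solutionAltRec ((cs.drop (l + 1)).take ((r - 1) + 1 - (l + 1))) else 0 := by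
        rw [solutionAltRec, if_neg (by rw [hmidlen]; omega), hg0, hg1, hmid]
        simp only [Option.some.injEq]
      have hA : solutionLoop cs (l : Int) (r : Int) m =
          if cs[l] = cs[r] then solutionLoop cs ((l : Int) + 1) ((r : Int) - 1) (m + 1) else m := by
        rw [solutionLoop, if_pos (show (l : Int) < (r : Int) by exact_mod_cast hlr), hgl, hgr]
        simp only [Option.some.injEq, ite_not]
      rw [hA, hB]
      by_cases heq : cs[l] = cs[r]
      · rw [if_pos heq, if_pos heq]
        have hcast1 : (l : Int) + 1 = ((l + 1 : Nat) : Int) := by push_cast; ring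
        have hcast2 : (r : Int) - 1 = ((r - 1 : Nat) : Int) := by omega
        rw [hcast1, hcast2, ih (l + 1) (r - 1) (m + 1) (by omega) (by omega)]
        ring
      · rw [if_neg heq, if_neg heq]
        omega
    · -- loop exits; mid has length ≤ 1
      rw [solutionLoop, if_neg (by exact_mod_cast hlr), solutionAltRec,
          if_pos (by simp; omega)]
      omega

-- ===== VERDICT (by name: the statement is the Claim_ definition above) =====
theorem solution_spec : Claim_equal_solution := by
  intro s _
  unfold Spec_solution solution solution_alt
  rcases hcs : s.toList with _ | ⟨c, t⟩
  · rw [solutionLoop, solutionAltRec]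
    norm_num
  · have hlen : 1 ≤ (c :: t).length := by simp
    have hcast : ((c :: t).length : Int) - 1 = (((c :: t).length - 1 : Nat) : Int) := by omega
    rw [hcast]
    have := loop_eq (c :: t) (c :: t).length 0 ((c :: t).length - 1) 0 (by omega) (by omega)
    rw [show ((0 : Nat) : Int) = 0 from rfl] at this
    rw [this]
    simp
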